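-- pv_equiv track=rewrite | github.com/sunilsoni/interview-notes-python | com/interview/2026/uber/test3.py | is_valid_alien_order
-- ===== SOURCE A (Python) =====
-- def is_valid_alien_order(words, order):  # This function checks if the produced order keeps the words sorted
--     if order == []:  # If order is empty, we treat it as invalid for this simple test checker
--         return False  # Because in this single test we expect a real order, not empty
--
--     rank = {}  # rank will map each character to its position in the alien order
--     for i, ch in enumerate(order):  # Enumerate gives both index and character
--         rank[ch] = i  # Store numeric rank for fast comparisons
--
--     # Ensure order contains exactly the same characters that appear in the input
--     all_chars = set()  # Set for unique characters in words
--     for w in words:  # Loop through words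
--         for ch in w:  # Loop through characters in word
--             all_chars.add(ch)  # Add to the set
--
--     if set(order) != all_chars:  # If missing or extra characters exist
--         return False  # Then the order is not valid
--
--     # Check each adjacent pair is in sorted order using the alien ranking
--     for i in range(len(words) - 1):  # Compare each word with the next
--         w1 = words[i]  # First word
--         w2 = words[i + 1]  # Second word
--
--         min_len = min(len(w1), len(w2))  # Compare only up to the shorter length
--         decided = False  # Track if we found a character difference
--
--         for j in range(min_len):  # Walk character by character
--             if w1[j] != w2[j]:  # First difference decides the ordering
--                 if rank[w1[j]] > rank[w2[j]]:  # If w1 char ranks after w2 char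
--                     return False  # Then the words are not sorted correctly
--                 decided = True  # We successfully validated this pair
--                 break  # Stop at first difference
--
--         if not decided:  # If all compared characters were the same
--             if len(w1) > len(w2):  # Then shorter must come first
--                 return False  # Otherwise invalid ordering
--
--     return True  # All checks passed
-- ===== SOURCE B (Python) =====
-- def is_valid_alien_order(words, order):
--     if not order:
--         return False
--     rank = {ch: i for i, ch in enumerate(order)}
--     if set(order) != {ch for w in words for ch in w}:
--         return False
--     keys = [[rank[c] for c in w] for w in words]
--     return all(k1 <= k2 for k1, k2 in zip(keys, keys[1:]))
-- ===== Notes on version B (the rewrite author's own statement) =====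
-- stated objective: simpler
-- what changed: The manual adjacent-pair loop with its char-by-char scan, `decided` flag, rank comparison and prefix-length branch is replaced by mapping each word to its list of ranks and letting Python's built-in lexicographic list `<=` compare adjacent rank lists.
import Mathlib
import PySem

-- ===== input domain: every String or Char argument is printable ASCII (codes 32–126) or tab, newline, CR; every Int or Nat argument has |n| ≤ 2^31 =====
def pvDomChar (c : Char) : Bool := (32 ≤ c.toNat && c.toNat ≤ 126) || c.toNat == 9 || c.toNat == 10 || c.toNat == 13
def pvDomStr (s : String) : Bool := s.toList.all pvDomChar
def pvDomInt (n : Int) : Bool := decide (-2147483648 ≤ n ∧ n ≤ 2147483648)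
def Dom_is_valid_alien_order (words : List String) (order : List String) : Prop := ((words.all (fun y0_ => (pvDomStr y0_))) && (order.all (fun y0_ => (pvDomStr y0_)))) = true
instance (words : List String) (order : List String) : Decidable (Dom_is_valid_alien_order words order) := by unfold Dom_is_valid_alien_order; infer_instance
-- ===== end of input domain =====

-- B replaces A's manual char-by-char adjacent-pair loop (with its `decided` flag and
-- prefix-length branch) by mapping each word to its list of ranks and using Python's
-- built-in lexicographic list `<=` on adjacent rank lists; objective: simpler.

-- Both Pythons build the same rank dict ({ch: i for i, ch in enumerate(order)}): shared helper.
def pvMkRank (order : List String) : PySem.Dict String Int :=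
  (PySem.List.enumerate order 0).foldl (fun d p => d.insert p.2 p.1) PySem.Dict.empty

-- ===== PORT A =====
-- A's `all_chars` set loop: for w in words: for ch in w: all_chars.add(ch)
def pvAllCharsA (words : List String) : PySem.Set String :=
  words.foldl (fun s w => w.toList.foldl (fun s ch => PySem.Set.add s (String.singleton ch)) s) PySem.Set.empty

-- A's inner `for j in range(min_len)` loop: some false = `return False`,
-- some true = `decided = True; break`, none = loop ended with decided == False.
-- (`rank[...]` is ported as getD _ 0: the lookup is only reached after the charset
-- check, which guarantees the key is present, so the default is never used.)
def pvInnerA (rank : PySem.Dict String Int) : List Char → List Char → Option Bool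
  | a :: as, b :: bs =>
    if a ≠ b then
      if rank.getD (String.singleton a) 0 > rank.getD (String.singleton b) 0 then some false
      else some true
    else pvInnerA rank as bs
  | _, _ => none

-- A's outer `for i in range(len(words) - 1)` loop over adjacent pairs.
def pvPairsA (rank : PySem.Dict String Int) : List String → Bool
  | w1 :: w2 :: rest =>
    match pvInnerA rank w1.toList w2.toList with
    | some false => false
    | some true => pvPairsA rank (w2 :: rest)
    | none => if w1.toList.length > w2.toList.length then false else pvPairsA rank (w2 :: rest)
  | _ => true

def is_valid_alien_order (words : List String) (order : List String) : Bool :=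
  if order = [] then false
  else if !(PySem.Set.equal (PySem.Set.ofList order) (pvAllCharsA words)) then false
  else pvPairsA (pvMkRank order) words

-- ===== PORT B =====
-- Python's list `<=` on lists of ints (lexicographic, shorter prefix first).
def pyListLe : List Int → List Int → Bool
  | [], _ => true
  | _ :: _, [] => false
  | x :: xs, y :: ys => if x = y then pyListLe xs ys else decide (x < y)

def is_valid_alien_order_alt (words : List String) (order : List String) : Bool :=
  if order.isEmpty then false
  else if !(PySem.Set.equal (PySem.Set.ofList order)
        (PySem.Set.ofList (words.flatMap (fun w => w.toList.map String.singleton)))) then false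
  else
    let keys := words.map (fun w => w.toList.map (fun c => (pvMkRank order).getD (String.singleton c) 0))
    (keys.zip keys.tail).all (fun p => pyListLe p.1 p.2)

-- ===== PRECONDITION & SPEC =====
def Spec_is_valid_alien_order (words : List String) (order : List String) (out : Bool) : Prop := out = is_valid_alien_order_alt words order
instance (words : List String) (order : List String) (out : Bool) : Decidable (Spec_is_valid_alien_order words order out) := by unfold Spec_is_valid_alien_order; infer_instance

-- ===== CLAIM (what is proved, stated in full; the proofs are below) =====
def Claim_equal_is_valid_alien_order : Prop := ∀ (words : List String) (order : List String), Dom_is_valid_alien_order words order → Spec_is_valid_alien_order words order (is_valid_alien_order words order)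

-- ===== LEMMAS AND PROOFS =====

theorem string_singleton_inj {a b : Char} (h : String.singleton a = String.singleton b) : a = b := by
  have := congrArg String.toList h
  simpa using this

-- Invariant of the rank-building fold: every stored value is below the next index,
-- and the value map is injective.
theorem rank_fold_inv (l : List String) : ∀ (s : Int) (d : PySem.Dict String Int),
    (∀ k v, d.get? k = some v → v < s) →
    (∀ k1 k2 v, d.get? k1 = some v → d.get? k2 = some v → k1 = k2) →
    (∀ k v, ((PySem.List.enumerate l s).foldl (fun d p => d.insert p.2 p.1) d).get? k = some v → v < s + l.length) ∧
    (∀ k1 k2 v, ((PySem.List.enumerate l s).foldl (fun d p => d.insert p.2 p.1) d).get? k1 = some v →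
       ((PySem.List.enumerate l s).foldl (fun d p => d.insert p.2 p.1) d).get? k2 = some v → k1 = k2) := by
  induction l with
  | nil => intro s d hlt hinj; simpa [PySem.List.enumerate_nil] using ⟨hlt, hinj⟩
  | cons x xs ih =>
    intro s d hlt hinj
    rw [PySem.List.enumerate_cons]
    simp only [List.foldl_cons]
    have h1 : ∀ k v, ((d.insert x s).get? k = some v) → v < s + 1 := by
      intro k v h
      rw [PySem.Dict.get?_insert] at h
      split at h
      · simp only [Option.some.injEq] at h; omega
      · exact lt_trans (hlt k v h) (by omega)
    have h2 : ∀ k1 k2 v, ((d.insert x s).get? k1 = some v) → ((d.insert x s).get? k2 = some v) → k1 = k2 := by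
      intro k1 k2 v ha hb
      rw [PySem.Dict.get?_insert] at ha hb
      split at ha <;> split at hb
      · rename_i hk1 hk2; rw [hk1, hk2]
      · rename_i hk1 hk2
        exfalso
        simp only [Option.some.injEq] at ha
        have := hlt k2 v hb; omega
      · rename_i hk1 hk2
        exfalso
        simp only [Option.some.injEq] at hb
        have := hlt k1 v ha; omega
      · exact hinj k1 k2 v ha hb
    have := ih (s + 1) (d.insert x s) h1 h2
    constructor
    · intro k v h
      have := this.1 k v h
      simp only [List.length_cons]
      push_cast
      push_cast at this
      omega
    · exact this.2

-- Every key that occurs in l (or was already present) is present after the fold.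
theorem rank_fold_isSome (l : List String) : ∀ (s : Int) (d : PySem.Dict String Int) (k : String),
    (k ∈ l ∨ (d.get? k).isSome) →
    (((PySem.List.enumerate l s).foldl (fun d p => d.insert p.2 p.1) d).get? k).isSome := by
  induction l with
  | nil => intro s d k h; simpa [PySem.List.enumerate_nil] using h.resolve_left (by simp)
  | cons x xs ih =>
    intro s d k h
    rw [PySem.List.enumerate_cons]
    simp only [List.foldl_cons]
    apply ih
    by_cases hk : k = x
    · right; subst hk; simp [PySem.Dict.get?_insert_self]
    · rcases h with h | h
      · rcases List.mem_cons.mp h with h | h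
        · exact absurd h hk
        · exact Or.inl h
      · right; rwa [PySem.Dict.get?_insert_of_ne _ _ hk]

-- A's nested all_chars loop is the set of all singleton-char strings of words.
theorem allchars_fold_eq (ws : List String) : ∀ (s : PySem.Set String),
    ws.foldl (fun s w => w.toList.foldl (fun s ch => PySem.Set.add s (String.singleton ch)) s) s
      = PySem.Set.update s (ws.flatMap (fun w => w.toList.map String.singleton)) := by
  induction ws with
  | nil => intro s; simp [PySem.Set.update]
  | cons w ws ih =>
    intro s
    simp only [List.foldl_cons, List.flatMap_cons]
    rw [← PySem.Set.update_map_eq_foldl_add, ih, PySem.Set.update_append]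

theorem pvAllCharsA_eq (ws : List String) :
    pvAllCharsA ws = PySem.Set.ofList (ws.flatMap (fun w => w.toList.map String.singleton)) := by
  rw [pvAllCharsA, allchars_fold_eq]
  exact PySem.Set.update_nil_left _

-- A's verdict for one adjacent pair, as a Bool.
def pairOkA (rank : PySem.Dict String Int) (as bs : List Char) : Bool :=
  match pvInnerA rank as bs with
  | some b => b
  | none => decide (as.length ≤ bs.length)

theorem pvPairsA_cons (rank : PySem.Dict String Int) (w1 w2 : String) (rest : List String) :
    pvPairsA rank (w1 :: w2 :: rest) = (pairOkA rank w1.toList w2.toList && pvPairsA rank (w2 :: rest)) := by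
  cases h : pvInnerA rank w1.toList w2.toList with
  | some b =>
    cases b <;> simp [pvPairsA, pairOkA, h]
  | none =>
    simp only [pvPairsA, pairOkA, h]
    by_cases hl : w1.toList.length > w2.toList.length
    · rw [if_pos hl, decide_eq_false (by omega)]; simp
    · rw [if_neg hl, decide_eq_true (by omega)]; simp

theorem pairOkA_cons_same (rank : PySem.Dict String Int) (a : Char) (as bs : List Char) :
    pairOkA rank (a :: as) (a :: bs) = pairOkA rank as bs := by
  have hi : pvInnerA rank (a :: as) (a :: bs) = pvInnerA rank as bs := by
    simp [pvInnerA]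
  cases h : pvInnerA rank as bs with
  | some b => simp [pairOkA, hi, h]
  | none => simp [pairOkA, hi, h]

theorem pairOk_eq_listLe (rank : PySem.Dict String Int)
    (hinj : ∀ k1 k2 v, rank.get? k1 = some v → rank.get? k2 = some v → k1 = k2) :
    ∀ (as bs : List Char),
      (∀ c ∈ as, (rank.get? (String.singleton c)).isSome) →
      (∀ c ∈ bs, (rank.get? (String.singleton c)).isSome) →
      pairOkA rank as bs
        = pyListLe (as.map (fun c => rank.getD (String.singleton c) 0))
                   (bs.map (fun c => rank.getD (String.singleton c) 0)) := by
  intro as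
  induction as with
  | nil => intro bs _ _; simp [pairOkA, pvInnerA, pyListLe]
  | cons a as ih =>
    intro bs ha hb
    cases bs with
    | nil => simp [pairOkA, pvInnerA, pyListLe]
    | cons b bs =>
      by_cases hab : a = b
      · subst hab
        rw [pairOkA_cons_same]
        simp only [List.map_cons, pyListLe]
        exact ih bs (fun c hc => ha c (List.mem_cons_of_mem _ hc)) (fun c hc => hb c (List.mem_cons_of_mem _ hc))
      · obtain ⟨va, hva⟩ := Option.isSome_iff_exists.mp (ha a (List.mem_cons_self))
        obtain ⟨vb, hvb⟩ := Option.isSome_iff_exists.mp (hb b (List.mem_cons_self))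
        have hda : rank.getD (String.singleton a) 0 = va := PySem.Dict.getD_of_get?_eq_some _ _ hva
        have hdb : rank.getD (String.singleton b) 0 = vb := PySem.Dict.getD_of_get?_eq_some _ _ hvb
        have hvne : va ≠ vb := by
          intro he; subst he
          exact hab (string_singleton_inj (hinj _ _ _ hva hvb))
        have hia : pvInnerA rank (a :: as) (b :: bs) = (if va > vb then some false else some true) := by
          simp [pvInnerA, hab, hda, hdb]
        simp only [List.map_cons, pyListLe, hda, hdb, if_neg hvne]
        by_cases hlt : va > vb
        · simp [pairOkA, hia, hlt]; omega
        · simp [pairOkA, hia, hlt]; omega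

theorem pairs_eq_all (rank : PySem.Dict String Int)
    (hinj : ∀ k1 k2 v, rank.get? k1 = some v → rank.get? k2 = some v → k1 = k2) :
    ∀ (ws : List String),
      (∀ w ∈ ws, ∀ c ∈ w.toList, (rank.get? (String.singleton c)).isSome) →
      pvPairsA rank ws
        = (((ws.map (fun w => w.toList.map (fun c => rank.getD (String.singleton c) 0))).zip
            (ws.map (fun w => w.toList.map (fun c => rank.getD (String.singleton c) 0))).tail).all
            (fun p => pyListLe p.1 p.2)) := by
  intro ws
  induction ws with
  | nil => intro _; simp [pvPairsA]
  | cons w1 ws ih =>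
    intro hpres
    cases ws with
    | nil => simp [pvPairsA]
    | cons w2 rest =>
      rw [pvPairsA_cons]
      have h1 : ∀ c ∈ w1.toList, (rank.get? (String.singleton c)).isSome :=
        hpres w1 (List.mem_cons_self)
      have h2 : ∀ c ∈ w2.toList, (rank.get? (String.singleton c)).isSome :=
        hpres w2 (List.mem_cons_of_mem _ (List.mem_cons_self))
      rw [pairOk_eq_listLe rank hinj _ _ h1 h2,
          ih (fun w hw => hpres w (List.mem_cons_of_mem _ hw))]
      simp

-- ===== VERDICT (by name: the statement is the Claim_ definition above) =====
theorem is_valid_alien_order_spec : Claim_equal_is_valid_alien_order := by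
  intro words order _
  unfold Spec_is_valid_alien_order
  rw [is_valid_alien_order, is_valid_alien_order_alt, pvAllCharsA_eq]
  simp only [List.isEmpty_iff]
  by_cases hord : order = []
  · simp [hord]
  · simp only [if_neg hord]
    by_cases hset : PySem.Set.equal (PySem.Set.ofList order)
        (PySem.Set.ofList (words.flatMap (fun w => w.toList.map String.singleton))) = true
    · rw [if_neg (by simp [hset]), if_neg (by simp [hset])]
      have hinv := rank_fold_inv order 0 PySem.Dict.empty
        (by intro k v h; simp [PySem.Dict.get?_empty] at h)
        (by intro k1 k2 v h; simp [PySem.Dict.get?_empty] at h)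
      have hinj := hinv.2
      have hpres : ∀ w ∈ words, ∀ c ∈ w.toList, ((pvMkRank order).get? (String.singleton c)).isSome := by
        intro w hw c hc
        have hmem : String.singleton c ∈ words.flatMap (fun w => w.toList.map String.singleton) := by
          exact List.mem_flatMap.mpr ⟨w, hw, List.mem_map.mpr ⟨c, hc, rfl⟩⟩
        have h2 := (PySem.Set.equal_iff _ _).mp hset (String.singleton c)
        simp only [PySem.Set.mem_ofList] at h2
        exact rank_fold_isSome order 0 PySem.Dict.empty _ (Or.inl (h2.mpr hmem))
      exact pairs_eq_all (pvMkRank order) hinj words hpres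
    · simp [hset]
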